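-- pv_equiv track=rewrite | github.com/RenderingMan/OSRS_bot_keras | inv.py | getItemCoord
-- ===== SOURCE A (Python) =====
-- def getItemCoord(itemIndx):
-- 	xc = 13
-- 	yc = 5
--
-- 	xcc = 44
-- 	ycc = 36
--
-- 	for y in range(0,7):
-- 		for x in range(0,4):
-- 			nx = xc+(x*42)
-- 			ny = yc+(y*36)
-- 			itm = (y*4)+x
-- 			if(itm == itemIndx):
-- 				return(nx,ny)
-- ===== SOURCE B (Python) =====
-- def getItemCoord(itemIndx):
-- 	if itemIndx in range(28):
-- 		return (13 + (itemIndx % 4) * 42, 5 + (itemIndx // 4) * 36)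
-- 	return None
-- ===== Notes on version B (the rewrite author's own statement) =====
-- stated objective: simpler
-- what changed: Replaced the nested row/column search loop with a range check and a direct closed-form computation via // and %.
import Mathlib
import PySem

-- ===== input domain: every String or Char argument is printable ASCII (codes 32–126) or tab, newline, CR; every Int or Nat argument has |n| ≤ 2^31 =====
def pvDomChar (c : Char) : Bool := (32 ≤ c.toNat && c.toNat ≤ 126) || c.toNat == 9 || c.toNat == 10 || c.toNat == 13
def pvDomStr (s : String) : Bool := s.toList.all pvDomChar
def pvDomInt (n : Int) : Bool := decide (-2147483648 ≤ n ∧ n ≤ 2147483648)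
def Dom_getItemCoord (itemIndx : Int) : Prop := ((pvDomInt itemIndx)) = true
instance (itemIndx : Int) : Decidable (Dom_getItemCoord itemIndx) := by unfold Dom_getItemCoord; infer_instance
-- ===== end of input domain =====

-- B replaces A's nested search loop with a range test and direct //%-arithmetic (objective: simpler).

-- ===== PORT A =====
-- nested for-loops with early return, ported as folds over an Option accumulator
def getItemCoord (itemIndx : Int) : Option (Int × Int) :=
  let xc : Int := 13
  let yc : Int := 5
  (PySem.List.pyRange 0 7 1).foldl (fun acc y =>
    match acc with
    | some r => some r
    | none =>
      (PySem.List.pyRange 0 4 1).foldl (fun acc2 x =>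
        match acc2 with
        | some r => some r
        | none =>
          let nx := xc + x * 42
          let ny := yc + y * 36
          let itm := y * 4 + x
          if itm = itemIndx then some (nx, ny) else none) none) none

-- ===== PORT B =====
def getItemCoord_alt (itemIndx : Int) : Option (Int × Int) :=
  if 0 ≤ itemIndx ∧ itemIndx < 28 then
    some (13 + PySem.Int.mod itemIndx 4 * 42, 5 + PySem.Int.floordiv itemIndx 4 * 36)
  else
    none

-- ===== PRECONDITION & SPEC =====
def Spec_getItemCoord (itemIndx : Int) (out : Option (Int × Int)) : Prop := out = getItemCoord_alt itemIndx
instance (itemIndx : Int) (out : Option (Int × Int)) : Decidable (Spec_getItemCoord itemIndx out) := by unfold Spec_getItemCoord; infer_instance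

-- ===== CLAIM (what is proved, stated in full; the proofs are below) =====
def Claim_equal_getItemCoord : Prop := ∀ (itemIndx : Int), Dom_getItemCoord itemIndx → Spec_getItemCoord itemIndx (getItemCoord itemIndx)

-- ===== LEMMAS AND PROOFS =====
theorem pvRange7 : PySem.List.pyRange 0 7 1 = [0, 1, 2, 3, 4, 5, 6] := by decide
theorem pvRange4 : PySem.List.pyRange 0 4 1 = [0, 1, 2, 3] := by decide

theorem pvFoldlKeepNone {β : Type} (f : Option β → Int → Option β) (l : List Int)
    (hnone : ∀ y ∈ l, f none y = none) :
    l.foldl f none = none := by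
  induction l with
  | nil => rfl
  | cons hd tl ih =>
      simp only [List.foldl, hnone hd (List.mem_cons_self ..)]
      exact ih fun y hy => hnone y (List.mem_cons_of_mem _ hy)

-- ===== VERDICT (by name: the statement is the Claim_ definition above) =====
theorem getItemCoord_spec : Claim_equal_getItemCoord := by
  intro i _
  show getItemCoord i = getItemCoord_alt i
  by_cases h : 0 ≤ i ∧ i < 28
  · obtain ⟨h0, h1⟩ := h
    interval_cases i <;> rfl
  · push Not at h
    have hA : getItemCoord i = none := by
      unfold getItemCoord
      refine pvFoldlKeepNone _ _ (fun y hy => ?_)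
      refine pvFoldlKeepNone _ _ (fun x hx => ?_)
      rw [pvRange7] at hy
      rw [pvRange4] at hx
      simp only [List.mem_cons, List.not_mem_nil, or_false] at hy hx
      have : ¬ (y * 4 + x = i) := by
        rcases hy with rfl | rfl | rfl | rfl | rfl | rfl | rfl <;>
          rcases hx with rfl | rfl | rfl | rfl <;> omega
      simp only [if_neg this]
    rw [hA, getItemCoord_alt, if_neg (by omega)]
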